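-- pv_equiv track=rewrite | github.com/kentblock/CSES-problems | dynamic_programming/two_setsII/two_sets.py | two_sets
-- ===== SOURCE A (Python) =====
-- MOD = 10 ** 9 + 7
--
-- def two_sets(n):
--     s = n * (n + 1) // 2
--     if s % 2 != 0:
--         return 0
--     target = s // 2
--     dp = [[0 for _ in range(target + 1)] for _ in range(n + 1)]
--     dp[0][0] = 1
--     for i in range(1, len(dp)):
--         dp[i][0] = 1
--         for j in range(1, len(dp[0])):
--             dp[i][j] = dp[i - 1][j] + (dp[i - 1][j - i] if j - i >= 0 else 0)
--     return (dp[n][target] // 2) % MOD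
-- ===== SOURCE B (Python) =====
-- MOD = 10 ** 9 + 7
--
-- def two_sets(n):
--     s = n * (n + 1) // 2
--     if s % 2 != 0:
--         return 0
--     target = s // 2
--     memo = {}
--     def ways(i, j):
--         if i == 0:
--             return 1 if j == 0 else 0
--         key = (i, j)
--         if key in memo:
--             return memo[key]
--         r = ways(i - 1, j) + (ways(i - 1, j - i) if j - i >= 0 else 0)
--         memo[key] = r
--         return r
--     return ways(n, target) // 2 % MOD
-- ===== Notes on version B (the rewrite author's own statement) =====
-- stated objective: alternative
-- what changed: A's bottom-up 2D DP table filled row by row is replaced by a top-down memoized recursion ways(i,j) on the same mathematical recurrence: states are computed lazily on demand and cached in a dictionary keyed by (i,j) instead of pre-allocating and filling an (n+1)x(target+1) table.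
import Mathlib
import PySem

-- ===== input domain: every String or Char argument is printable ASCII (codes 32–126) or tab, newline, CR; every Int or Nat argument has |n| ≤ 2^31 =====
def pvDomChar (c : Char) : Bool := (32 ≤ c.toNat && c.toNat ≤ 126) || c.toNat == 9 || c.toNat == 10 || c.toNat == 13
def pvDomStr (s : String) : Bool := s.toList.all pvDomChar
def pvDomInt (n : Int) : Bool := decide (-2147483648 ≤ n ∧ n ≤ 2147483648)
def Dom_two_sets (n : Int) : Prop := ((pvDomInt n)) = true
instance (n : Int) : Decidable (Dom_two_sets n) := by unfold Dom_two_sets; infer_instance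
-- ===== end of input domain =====

-- B replaces A's bottom-up 2D DP table by a top-down memoized recursion on (i, j); return values proved equal on Pre_.

-- ===== PORT A =====
-- helpers for 2D table access (Python list-of-lists → Array of Arrays):
-- get2 dp i j = dp[i][j], set2 dp i j v = (dp[i][j] := v); indices are in range on Pre_
def get2 (dp : Array (Array Int)) (i j : Nat) : Int := (dp.getD i #[]).getD j 0
def set2 (dp : Array (Array Int)) (i j : Nat) (v : Int) : Array (Array Int) :=
  dp.modify i (fun r => r.setIfInBounds j v)

def two_sets (n : Int) : Int :=
  let s := PySem.Int.floordiv (n * (n + 1)) 2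
  if PySem.Int.mod s 2 ≠ 0 then 0
  else
    let target := PySem.Int.floordiv s 2
    -- dp = [[0]*(target+1) for _ in range(n+1)]; range(k) is empty for k ≤ 0, matching toNat
    let rows := (n + 1).toNat
    let cols := (target + 1).toNat
    let dp0 : Array (Array Int) := Array.replicate rows (Array.replicate cols 0)
    let dp1 := set2 dp0 0 0 1
    -- for i in range(1, len(dp)): dp[i][0] = 1; for j in range(1, len(dp[0])): dp[i][j] = ...
    let dp2 := (List.range' 1 (rows - 1)).foldl (fun dp i =>
      let dp := set2 dp i 0 1
      (List.range' 1 (cols - 1)).foldl (fun dp j =>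
        set2 dp i j (get2 dp (i - 1) j +
          (if (i : Int) ≤ (j : Int) then get2 dp (i - 1) (j - i) else 0))) dp) dp1
    PySem.Int.mod (PySem.Int.floordiv (get2 dp2 n.toNat target.toNat) 2) (10 ^ 9 + 7)

-- ===== PORT B =====
-- ways(i, j) with memo dict keyed by (i, j); the dict is threaded through the recursion
-- (the memo is internal state, never part of B's result: Std.HashMap stands in for the Python
-- dict so memo lookups are constant-time; lookup/insert semantics on distinct keys are identical)
def waysM : Nat → Int → Std.HashMap (Int × Int) Int → Int × Std.HashMap (Int × Int) Int
  | 0, j, memo => (if j = 0 then 1 else 0, memo)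
  | i + 1, j, memo =>
    match memo[(((i : Int) + 1, j) : Int × Int)]? with
    | some v => (v, memo)
    | none =>
      let p1 := waysM i j memo
      let a := p1.1
      let m1 := p1.2
      let p2 := if 0 ≤ j - ((i : Int) + 1) then waysM i (j - ((i : Int) + 1)) m1
                else ((0 : Int), m1)
      let b := p2.1
      let m2 := p2.2
      let r := a + b
      (r, m2.insert ((i : Int) + 1, j) r)

def two_sets_alt (n : Int) : Int :=
  let s := PySem.Int.floordiv (n * (n + 1)) 2
  if PySem.Int.mod s 2 ≠ 0 then 0
  else
    let target := PySem.Int.floordiv s 2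
    PySem.Int.mod (PySem.Int.floordiv (waysM n.toNat target ∅).1 2) (10 ^ 9 + 7)

-- ===== PRECONDITION & SPEC =====
-- Pre_ excludes exactly the inputs where A raises: n < 0 with even triangular sum
-- (dp then has no rows and the first assignment into dp raises IndexError; B's recursion
-- also fails to terminate/raises there).
def Pre_two_sets (n : Int) : Prop :=
  0 ≤ n ∨ PySem.Int.mod (PySem.Int.floordiv (n * (n + 1)) 2) 2 = 1
instance (n : Int) : Decidable (Pre_two_sets n) := by unfold Pre_two_sets; infer_instance

def pvWitness_two_sets : Int := 7

def Spec_two_sets (n : Int) (out : Int) : Prop := out = two_sets_alt n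
instance (n : Int) (out : Int) : Decidable (Spec_two_sets n out) := by unfold Spec_two_sets; infer_instance

-- ===== CLAIM (what is proved, stated in full; the proofs are below) =====
def Claim_equal_two_sets : Prop := ∀ (n : Int), Dom_two_sets n → Pre_two_sets n → Spec_two_sets n (two_sets n)

-- ===== LEMMAS AND PROOFS =====

-- getD facts for Array
theorem agetD_eq {α : Type} (a : Array α) (d : α) (i : Nat) (h : i < a.size) :
    a.getD i d = a[i] := by
  rw [Array.getD_eq_getD_getElem?, Array.getElem?_eq_getElem h]
  rfl

theorem agetD_default {α : Type} (a : Array α) (d : α) (i : Nat) (h : a.size ≤ i) :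
    a.getD i d = d := by
  rw [Array.getD_eq_getD_getElem?, Array.getElem?_eq_none h]
  rfl

theorem agetD_set_self {α : Type} (a : Array α) (d v : α) (i : Nat) (h : i < a.size) :
    (a.setIfInBounds i v).getD i d = v := by
  rw [agetD_eq _ _ _ (by simpa using h), Array.getElem_setIfInBounds]
  · simp
  · exact h

theorem agetD_set_ne {α : Type} (a : Array α) (d v : α) (i k : Nat) (h : k ≠ i) :
    (a.setIfInBounds i v).getD k d = a.getD k d := by
  by_cases hk : k < a.size
  · rw [agetD_eq _ _ _ (by simpa using hk), agetD_eq _ _ _ hk, Array.getElem_setIfInBounds]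
    · simp [Ne.symm h]
    · exact hk
  · rw [agetD_default _ _ _ (by simpa using Nat.le_of_not_lt hk),
        agetD_default _ _ _ (Nat.le_of_not_lt hk)]

theorem agetD_modify_self {α : Type} (a : Array α) (d : α) (f : α → α) (i : Nat)
    (h : i < a.size) : (a.modify i f).getD i d = f (a.getD i d) := by
  rw [agetD_eq _ _ _ (by simpa using h), agetD_eq _ _ _ h, Array.getElem_modify]
  simp

theorem agetD_modify_ne {α : Type} (a : Array α) (d : α) (f : α → α) (i k : Nat)
    (h : k ≠ i) : (a.modify i f).getD k d = a.getD k d := by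
  by_cases hk : k < a.size
  · rw [agetD_eq _ _ _ (by simpa using hk), agetD_eq _ _ _ hk, Array.getElem_modify]
    rw [if_neg (Ne.symm h)]
  · rw [agetD_default _ _ _ (by simpa using Nat.le_of_not_lt hk),
        agetD_default _ _ _ (Nat.le_of_not_lt hk)]

theorem agetD_replicate {α : Type} (n : Nat) (v d : α) (k : Nat) (h : k < n) :
    (Array.replicate n v).getD k d = v := by
  rw [agetD_eq _ _ _ (by simpa using h), Array.getElem_replicate]

-- the common row recurrence: row 0 = [1,0,...,0]; row i = stepRow i (row (i-1))
def stepRow (i : Nat) (prev : Array Int) : Array Int :=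
  prev.mapIdx (fun j v => v + if i ≤ j then prev.getD (j - i) 0 else 0)

def rowSpec (cols : Nat) : Nat → Array Int
  | 0 => (Array.replicate cols 0).setIfInBounds 0 1
  | i + 1 => stepRow (i + 1) (rowSpec cols i)

theorem size_stepRow (i : Nat) (prev : Array Int) : (stepRow i prev).size = prev.size := by
  simp [stepRow]

theorem size_rowSpec (cols k : Nat) : (rowSpec cols k).size = cols := by
  induction k with
  | zero => simp [rowSpec]
  | succ k ih => simp [rowSpec, size_stepRow, ih]

theorem getD_stepRow (i : Nat) (prev : Array Int) (j : Nat) (hj : j < prev.size) :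
    (stepRow i prev).getD j 0 = prev.getD j 0 + if i ≤ j then prev.getD (j - i) 0 else 0 := by
  have hj' : j < (stepRow i prev).size := by rw [size_stepRow]; exact hj
  rw [agetD_eq _ _ _ hj', agetD_eq _ _ _ hj]
  simp [stepRow]

theorem rowSpec_zero_getD (cols : Nat) (hc : 0 < cols) (k : Nat) :
    (rowSpec cols k).getD 0 0 = 1 := by
  induction k with
  | zero =>
    show ((Array.replicate cols 0).setIfInBounds 0 1).getD 0 0 = 1
    exact agetD_set_self _ _ _ _ (by simpa using hc)
  | succ k ih =>
    have h0 : 0 < (rowSpec cols k).size := by rw [size_rowSpec]; exact hc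
    show (stepRow (k + 1) (rowSpec cols k)).getD 0 0 = 1
    rw [getD_stepRow _ _ _ h0, if_neg (by omega), ih]
    ring

-- ---------- B side: the memoized recursion computes the pure recurrence ----------

-- the pure recurrence B's ways implements
def waysPure : Nat → Int → Int
  | 0, j => if j = 0 then 1 else 0
  | i + 1, j => waysPure i j + (if 0 ≤ j - ((i : Int) + 1) then waysPure i (j - ((i : Int) + 1)) else 0)

-- every cached value is the pure value of its key
def GoodMemo (m : Std.HashMap (Int × Int) Int) : Prop :=
  ∀ (p : Int × Int) (v : Int), m[p]? = some v → 0 ≤ p.1 ∧ v = waysPure p.1.toNat p.2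

theorem goodMemo_empty : GoodMemo (∅ : Std.HashMap (Int × Int) Int) := by
  intro p v h
  simp [Std.HashMap.getElem?_empty] at h

theorem waysM_correct : ∀ (i : Nat) (j : Int) (memo : Std.HashMap (Int × Int) Int),
    GoodMemo memo → (waysM i j memo).1 = waysPure i j ∧ GoodMemo (waysM i j memo).2 := by
  intro i
  induction i with
  | zero => intro j memo h; exact ⟨rfl, h⟩
  | succ i ih =>
    intro j memo h
    have hkey : (((i : Int) + 1, j) : Int × Int).1.toNat = i + 1 := by
      show ((i : Int) + 1).toNat = i + 1
      omega
    simp only [waysM]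
    cases hk : memo[(((i : Int) + 1, j) : Int × Int)]? with
    | some v =>
      have hv := h _ _ hk
      refine ⟨?_, h⟩
      show v = waysPure (i + 1) j
      rw [hv.2, hkey]
    | none =>
      obtain ⟨h1, hg1⟩ := ih j memo h
      by_cases hc : 0 ≤ j - ((i : Int) + 1)
      · obtain ⟨h2, hg2⟩ := ih (j - ((i : Int) + 1)) (waysM i j memo).2 hg1
        rw [if_pos hc]
        constructor
        · show (waysM i j memo).1 + (waysM i (j - ((i : Int) + 1)) (waysM i j memo).2).1 = waysPure (i + 1) j
          rw [h1, h2]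
          simp only [waysPure]
          rw [if_pos hc]
        · intro p v hpv
          rw [Std.HashMap.getElem?_insert] at hpv
          split_ifs at hpv with hp
          · rw [beq_iff_eq] at hp
            subst hp
            refine ⟨by simp; omega, ?_⟩
            cases hpv
            rw [hkey, h1, h2]
            simp only [waysPure]
            rw [if_pos hc]
          · exact hg2 _ _ hpv
      · rw [if_neg hc]
        constructor
        · show (waysM i j memo).1 + 0 = waysPure (i + 1) j
          rw [h1]
          simp only [waysPure]
          rw [if_neg hc, add_zero]
        · intro p v hpv
          rw [Std.HashMap.getElem?_insert] at hpv
          split_ifs at hpv with hp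
          · rw [beq_iff_eq] at hp
            subst hp
            refine ⟨by simp; omega, ?_⟩
            cases hpv
            rw [hkey, h1]
            simp only [waysPure]
            rw [if_neg hc, add_zero]
          · exact hg1 _ _ hpv

-- the pure recurrence equals the DP row values
theorem waysPure_rowSpec (cols : Nat) (hc : 0 < cols) :
    ∀ (i : Nat) (j : Int), 0 ≤ j → j < (cols : Int) →
      waysPure i j = (rowSpec cols i).getD j.toNat 0 := by
  intro i
  induction i with
  | zero =>
    intro j hj0 hjc
    show (if j = 0 then 1 else 0) = ((Array.replicate cols 0).setIfInBounds 0 1).getD j.toNat 0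
    by_cases hj : j = 0
    · subst hj
      rw [if_pos rfl]
      exact (agetD_set_self _ _ _ _ (by simpa using hc)).symm
    · rw [if_neg hj, agetD_set_ne _ _ _ _ _ (by omega), agetD_replicate _ _ _ _ (by omega)]
  | succ i ih =>
    intro j hj0 hjc
    have hjlt : j.toNat < (rowSpec cols i).size := by rw [size_rowSpec]; omega
    show waysPure i j + (if 0 ≤ j - ((i : Int) + 1) then waysPure i (j - ((i : Int) + 1)) else 0) =
      (stepRow (i + 1) (rowSpec cols i)).getD j.toNat 0
    rw [getD_stepRow _ _ _ hjlt, ← ih j hj0 hjc]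
    congr 1
    by_cases hcnd : 0 ≤ j - ((i : Int) + 1)
    · rw [if_pos hcnd, if_pos (by omega)]
      rw [ih (j - ((i : Int) + 1)) hcnd (by omega)]
      congr 1
      omega
    · rw [if_neg hcnd, if_neg (by omega)]

-- ---------- A side ----------

theorem get2_eq (dp : Array (Array Int)) (i j : Nat) :
    get2 dp i j = (dp.getD i #[]).getD j 0 := rfl

theorem getD_set2_same (dp : Array (Array Int)) (i j : Nat) (v : Int) (hi : i < dp.size) :
    (set2 dp i j v).getD i #[] = (dp.getD i #[]).setIfInBounds j v :=
  agetD_modify_self _ _ _ _ hi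

theorem getD_set2_ne (dp : Array (Array Int)) (i j k : Nat) (v : Int) (hk : k ≠ i) :
    (set2 dp i j v).getD k #[] = dp.getD k #[] :=
  agetD_modify_ne _ _ _ _ _ hk

theorem size_set2 (dp : Array (Array Int)) (i j : Nat) (v : Int) :
    (set2 dp i j v).size = dp.size := by simp [set2]

-- A's inner loop writes row i ascending, reading only row i-1
theorem innerA (cols : Nat) (hc : 0 < cols) (i : Nat) (hi : 1 ≤ i) (dp : Array (Array Int))
    (hilt : i < dp.size) (prev : Array Int) (hprev : dp.getD (i - 1) #[] = prev)
    (hplen : prev.size = cols) (hrow : dp.getD i #[] = Array.replicate cols 0) :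
    ∀ t : Nat, t ≤ cols - 1 →
    (((List.range' 1 t).foldl (fun dp j =>
        set2 dp i j (get2 dp (i - 1) j +
          (if (i : Int) ≤ (j : Int) then get2 dp (i - 1) (j - i) else 0))) (set2 dp i 0 1)).size = dp.size ∧
     (∀ k : Nat, k ≠ i → ((List.range' 1 t).foldl (fun dp j =>
        set2 dp i j (get2 dp (i - 1) j +
          (if (i : Int) ≤ (j : Int) then get2 dp (i - 1) (j - i) else 0))) (set2 dp i 0 1)).getD k #[] = dp.getD k #[]) ∧
     (((List.range' 1 t).foldl (fun dp j =>
        set2 dp i j (get2 dp (i - 1) j +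
          (if (i : Int) ≤ (j : Int) then get2 dp (i - 1) (j - i) else 0))) (set2 dp i 0 1)).getD i #[]).size = cols ∧
     (∀ k : Nat, k < cols → (((List.range' 1 t).foldl (fun dp j =>
        set2 dp i j (get2 dp (i - 1) j +
          (if (i : Int) ≤ (j : Int) then get2 dp (i - 1) (j - i) else 0))) (set2 dp i 0 1)).getD i #[]).getD k 0 =
        if k = 0 then 1
        else if 1 ≤ k ∧ k ≤ t then prev.getD k 0 + (if i ≤ k then prev.getD (k - i) 0 else 0)
        else 0)) := by
  intro t
  induction t with
  | zero =>
    intro _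
    simp only [List.range'_zero, List.foldl_nil]
    have hrowi : (set2 dp i 0 1).getD i #[] = (Array.replicate cols 0).setIfInBounds 0 1 := by
      rw [getD_set2_same _ _ _ _ hilt, hrow]
    refine ⟨size_set2 _ _ _ _, fun k hk => getD_set2_ne _ _ _ _ _ hk, ?_, ?_⟩
    · rw [hrowi]; simp
    · intro k hk
      rw [hrowi]
      by_cases hk0 : k = 0
      · subst hk0
        rw [if_pos rfl]
        exact agetD_set_self _ _ _ _ (by simpa using hc)
      · rw [if_neg hk0, if_neg (by omega)]
        rw [agetD_set_ne _ _ _ _ _ hk0]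
        exact agetD_replicate _ _ _ _ hk
  | succ t ih =>
    intro ht
    obtain ⟨hl, hne, hsz, hrowi⟩ := ih (by omega)
    rw [List.range'_1_concat, List.foldl_append]
    simp only [List.foldl_cons, List.foldl_nil]
    set st := (List.range' 1 t).foldl (fun dp j =>
        set2 dp i j (get2 dp (i - 1) j +
          (if (i : Int) ≤ (j : Int) then get2 dp (i - 1) (j - i) else 0))) (set2 dp i 0 1) with hst
    have hi1i : i - 1 ≠ i := by omega
    have hget : get2 st (i - 1) (1 + t) = prev.getD (1 + t) 0 := by
      rw [get2_eq, hne _ hi1i, hprev]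
    have hget2 : get2 st (i - 1) (1 + t - i) = prev.getD (1 + t - i) 0 := by
      rw [get2_eq, hne _ hi1i, hprev]
    have hrownew : (set2 st i (1 + t) (get2 st (i - 1) (1 + t) +
          (if (i : Int) ≤ ((1 + t : Nat) : Int) then get2 st (i - 1) (1 + t - i) else 0))).getD i #[] =
        (st.getD i #[]).setIfInBounds (1 + t) (get2 st (i - 1) (1 + t) +
          (if (i : Int) ≤ ((1 + t : Nat) : Int) then get2 st (i - 1) (1 + t - i) else 0)) :=
      getD_set2_same _ _ _ _ (by rw [hl]; exact hilt)
    refine ⟨by rw [size_set2, hl], ?_, ?_, ?_⟩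
    · intro k hk
      rw [getD_set2_ne _ _ _ _ _ hk, hne k hk]
    · rw [hrownew]
      simpa using hsz
    · intro k hk
      rw [hrownew]
      by_cases hkt : k = 1 + t
      · subst hkt
        rw [agetD_set_self _ _ _ _ (by omega)]
        rw [hget, hget2]
        rw [if_neg (show ¬(1 + t = 0) by omega),
            if_pos (show 1 ≤ 1 + t ∧ 1 + t ≤ t + 1 by omega)]
        have hcast : ((i : Int) ≤ ((1 + t : Nat) : Int)) ↔ i ≤ 1 + t := by push_cast; omega
        rw [if_congr hcast rfl rfl]
      · rw [agetD_set_ne _ _ _ _ _ hkt, hrowi k hk]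
        by_cases hk0 : k = 0
        · rw [if_pos hk0, if_pos hk0]
        · rw [if_neg hk0, if_neg hk0]
          have hiff : (1 ≤ k ∧ k ≤ t) ↔ (1 ≤ k ∧ k ≤ t + 1) := by omega
          rw [if_congr hiff rfl rfl]

-- A's inner loop run to the end produces stepRow of the previous row
theorem innerA_eq (cols : Nat) (hc : 0 < cols) (i : Nat) (hi : 1 ≤ i) (dp : Array (Array Int))
    (hilt : i < dp.size) (prev : Array Int) (hprev : dp.getD (i - 1) #[] = prev)
    (hplen : prev.size = cols) (hrow : dp.getD i #[] = Array.replicate cols 0)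
    (hprev0 : prev.getD 0 0 = 1) :
    (((List.range' 1 (cols - 1)).foldl (fun dp j =>
        set2 dp i j (get2 dp (i - 1) j +
          (if (i : Int) ≤ (j : Int) then get2 dp (i - 1) (j - i) else 0))) (set2 dp i 0 1)).size = dp.size ∧
     (∀ k : Nat, k ≠ i → ((List.range' 1 (cols - 1)).foldl (fun dp j =>
        set2 dp i j (get2 dp (i - 1) j +
          (if (i : Int) ≤ (j : Int) then get2 dp (i - 1) (j - i) else 0))) (set2 dp i 0 1)).getD k #[] = dp.getD k #[]) ∧
     ((List.range' 1 (cols - 1)).foldl (fun dp j =>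
        set2 dp i j (get2 dp (i - 1) j +
          (if (i : Int) ≤ (j : Int) then get2 dp (i - 1) (j - i) else 0))) (set2 dp i 0 1)).getD i #[] = stepRow i prev) := by
  obtain ⟨hl, hne, hsz, hrowi⟩ := innerA cols hc i hi dp hilt prev hprev hplen hrow (cols - 1) (le_refl _)
  refine ⟨hl, hne, ?_⟩
  apply Array.ext (by rw [hsz, size_stepRow, hplen])
  intro k hk1 hk2
  have hk : k < cols := by rw [hsz] at hk1; exact hk1
  rw [← agetD_eq _ 0 _ hk1, ← agetD_eq _ 0 _ hk2]
  rw [hrowi k hk, getD_stepRow _ _ _ (by omega)]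
  by_cases hk0 : k = 0
  · subst hk0
    rw [if_pos rfl, if_neg (by omega), hprev0]
    ring
  · rw [if_neg hk0, if_pos ⟨by omega, by omega⟩]

-- invariant for A's outer loop
theorem outerA (cols : Nat) (hc : 0 < cols) (N : Nat) :
    ∀ m : Nat, m ≤ N →
    (((List.range' 1 m).foldl (fun dp i =>
        (List.range' 1 (cols - 1)).foldl (fun dp j =>
          set2 dp i j (get2 dp (i - 1) j +
            (if (i : Int) ≤ (j : Int) then get2 dp (i - 1) (j - i) else 0))) (set2 dp i 0 1))
        (set2 (Array.replicate (N + 1) (Array.replicate cols 0)) 0 0 1)).size = N + 1 ∧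
     (∀ k : Nat, k ≤ m → ((List.range' 1 m).foldl (fun dp i =>
        (List.range' 1 (cols - 1)).foldl (fun dp j =>
          set2 dp i j (get2 dp (i - 1) j +
            (if (i : Int) ≤ (j : Int) then get2 dp (i - 1) (j - i) else 0))) (set2 dp i 0 1))
        (set2 (Array.replicate (N + 1) (Array.replicate cols 0)) 0 0 1)).getD k #[] = rowSpec cols k) ∧
     (∀ k : Nat, m < k → k ≤ N → ((List.range' 1 m).foldl (fun dp i =>
        (List.range' 1 (cols - 1)).foldl (fun dp j =>
          set2 dp i j (get2 dp (i - 1) j +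
            (if (i : Int) ≤ (j : Int) then get2 dp (i - 1) (j - i) else 0))) (set2 dp i 0 1))
        (set2 (Array.replicate (N + 1) (Array.replicate cols 0)) 0 0 1)).getD k #[] = Array.replicate cols 0)) := by
  intro m
  induction m with
  | zero =>
    intro _
    simp only [List.range'_zero, List.foldl_nil]
    refine ⟨by rw [size_set2]; simp, ?_, ?_⟩
    · intro k hk
      interval_cases k
      rw [getD_set2_same _ _ _ _ (by simp)]
      rw [agetD_replicate _ _ _ _ (by omega)]
      rfl
    · intro k hk hkN
      rw [getD_set2_ne _ _ _ _ _ (by omega)]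
      exact agetD_replicate _ _ _ _ (by omega)
  | succ m ih =>
    intro hm
    obtain ⟨hl, hdone, hzero⟩ := ih (by omega)
    rw [List.range'_1_concat, List.foldl_append]
    simp only [List.foldl_cons, List.foldl_nil]
    set st := (List.range' 1 m).foldl (fun dp i =>
        (List.range' 1 (cols - 1)).foldl (fun dp j =>
          set2 dp i j (get2 dp (i - 1) j +
            (if (i : Int) ≤ (j : Int) then get2 dp (i - 1) (j - i) else 0))) (set2 dp i 0 1))
        (set2 (Array.replicate (N + 1) (Array.replicate cols 0)) 0 0 1) with hst
    have hstep := innerA_eq cols hc (1 + m) (by omega) st (by rw [hl]; omega)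
      (rowSpec cols m) (by have h1 : 1 + m - 1 = m := by omega
                           rw [h1]; exact hdone m (le_refl m))
      (size_rowSpec cols m) (hzero (1 + m) (by omega) (by omega))
      (rowSpec_zero_getD cols hc m)
    obtain ⟨hl', hne', hrow'⟩ := hstep
    refine ⟨by rw [hl', hl], ?_, ?_⟩
    · intro k hk
      by_cases hkm : k = 1 + m
      · subst hkm
        rw [hrow']
        have h1m : 1 + m = m + 1 := by omega
        rw [h1m]
        rfl
      · rw [hne' k hkm, hdone k (by omega)]
    · intro k hk1 hk2
      rw [hne' k (by omega), hzero k (by omega) hk2]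

-- final assembly: on n ≥ 0 with even triangular number, both ports return row n at target
theorem main_eq (n : Int) (hn : 0 ≤ n)
    (hs : ¬ PySem.Int.mod (PySem.Int.floordiv (n * (n + 1)) 2) 2 ≠ 0) :
    two_sets n = two_sets_alt n := by
  unfold two_sets two_sets_alt
  rw [if_neg hs, if_neg hs]
  set target := PySem.Int.floordiv (PySem.Int.floordiv (n * (n + 1)) 2) 2 with htar
  have hnn : 0 ≤ n * (n + 1) := by nlinarith [hn]
  have hs0 : 0 ≤ PySem.Int.floordiv (n * (n + 1)) 2 := by
    rw [PySem.Int.floordiv_eq_ediv_of_pos (by norm_num)]; exact Int.ediv_nonneg hnn (by norm_num)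
  have htnn : 0 ≤ target := by
    rw [htar, PySem.Int.floordiv_eq_ediv_of_pos (by norm_num)]; exact Int.ediv_nonneg hs0 (by norm_num)
  set cols : Nat := (target + 1).toNat with hcols
  have hc : 0 < cols := by rw [hcols]; omega
  have htc : target = (cols : Int) - 1 := by rw [hcols]; push_cast; omega
  have hN1 : (n + 1).toNat = n.toNat + 1 := by omega
  simp only [hN1]
  have hrows1 : n.toNat + 1 - 1 = n.toNat := by omega
  rw [hrows1]
  rw [← hcols]
  obtain ⟨hlA, hdoneA, _⟩ := outerA cols hc n.toNat n.toNat (le_refl _)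
  rw [get2_eq, hdoneA n.toNat (le_refl _)]
  rw [(waysM_correct n.toNat target ∅ goodMemo_empty).1]
  rw [waysPure_rowSpec cols hc n.toNat target htnn (by omega)]

-- ===== VERDICT (by name: the statement is the Claim_ definition above) =====
theorem two_sets_spec : Claim_equal_two_sets := by
  intro n _ hpre
  unfold Spec_two_sets
  by_cases hs : PySem.Int.mod (PySem.Int.floordiv (n * (n + 1)) 2) 2 ≠ 0
  · unfold two_sets two_sets_alt
    rw [if_pos hs, if_pos hs]
  · rcases hpre with hn | hodd
    · exact main_eq n hn hs
    · exact absurd hodd (by push_neg at hs; rw [hs]; norm_num)
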